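-- pv_equiv track=rewrite | github.com/SeungjaeLim/StarGAN-Improved | imagehash/tests/test_hash_is_constant.py | _calculate_segment_properties
-- ===== SOURCE A (Python) =====
-- def _calculate_segment_properties(segment):
-- 	length = len(segment)
-- 	min_y = min(coord[0] for coord in segment)
-- 	min_x = min(coord[1] for coord in segment)
-- 	max_y = max(coord[0] for coord in segment)
-- 	max_x = max(coord[1] for coord in segment)
-- 	return {
-- 		"length": length,
-- 		"min_x": min_x,
-- 		"min_y": min_y,
-- 		"max_x": max_x,
-- 		"max_y": max_y
-- 	}
-- ===== SOURCE B (Python) =====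
-- def _calculate_segment_properties(segment):
--     (y, x) = segment[0]
--     min_y = max_y = y
--     min_x = max_x = x
--     for (cy, cx) in segment[1:]:
--         if cy < min_y:
--             min_y = cy
--         if cy > max_y:
--             max_y = cy
--         if cx < min_x:
--             min_x = cx
--         if cx > max_x:
--             max_x = cx
--     return {
--         "length": len(segment),
--         "min_x": min_x,
--         "min_y": min_y,
--         "max_x": max_x,
--         "max_y": max_y
--     }
-- ===== Notes on version B (the rewrite author's own statement) =====
-- stated objective: faster
-- what changed: Replaces A's four separate min()/max() generator passes with a single loop that seeds the four extremes from the first coordinate and updates them with comparisons in one pass over the rest.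
import Mathlib
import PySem

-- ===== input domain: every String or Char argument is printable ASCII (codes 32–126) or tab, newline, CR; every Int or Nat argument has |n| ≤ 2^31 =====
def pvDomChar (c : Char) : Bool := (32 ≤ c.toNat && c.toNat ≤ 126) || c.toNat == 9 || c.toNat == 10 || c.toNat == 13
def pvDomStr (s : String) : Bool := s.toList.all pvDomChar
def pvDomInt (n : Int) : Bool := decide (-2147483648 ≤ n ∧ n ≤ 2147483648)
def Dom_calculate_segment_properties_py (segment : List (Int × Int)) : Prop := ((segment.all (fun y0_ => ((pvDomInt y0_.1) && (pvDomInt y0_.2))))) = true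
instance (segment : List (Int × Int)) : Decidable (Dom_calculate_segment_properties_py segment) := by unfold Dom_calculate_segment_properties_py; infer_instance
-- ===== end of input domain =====

-- B replaces A's four min()/max() generator passes by one loop seeded from the first coordinate updating the four extremes (single pass instead of four).
-- On the empty segment A raises ValueError (and B raises IndexError), so Pre_ excludes it.
-- ===== PORT A =====
def calculate_segment_properties_py (segment : List (Int × Int)) : List (String × Int) :=
  let length : Int := segment.length
  match PySem.List.min? (segment.map (fun coord => coord.1)) (fun v => v),
        PySem.List.min? (segment.map (fun coord => coord.2)) (fun v => v),
        PySem.List.max? (segment.map (fun coord => coord.1)) (fun v => v),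
        PySem.List.max? (segment.map (fun coord => coord.2)) (fun v => v) with
  | some min_y, some min_x, some max_y, some max_x =>
      [("length", length), ("min_x", min_x), ("min_y", min_y), ("max_x", max_x), ("max_y", max_y)]
  | _, _, _, _ => []  -- min()/max() of an empty sequence: ValueError, excluded by Pre_

-- ===== PORT B =====
def calculate_segment_properties_py_alt (segment : List (Int × Int)) : List (String × Int) :=
  match segment with
  | [] => []  -- segment[0]: IndexError, excluded by Pre_
  | (y, x) :: rest =>
      let s := rest.foldl
        (fun (s : Int × Int × Int × Int) (c : Int × Int) =>
          let min_y := if c.1 < s.1 then c.1 else s.1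
          let max_y := if c.1 > s.2.1 then c.1 else s.2.1
          let min_x := if c.2 < s.2.2.1 then c.2 else s.2.2.1
          let max_x := if c.2 > s.2.2.2 then c.2 else s.2.2.2
          (min_y, max_y, min_x, max_x))
        (y, y, x, x)
      [("length", (segment.length : Int)), ("min_x", s.2.2.1), ("min_y", s.1),
       ("max_x", s.2.2.2), ("max_y", s.2.1)]

-- ===== PRECONDITION & SPEC =====
-- Pre_ excludes the empty segment, on which A raises ValueError (min() of an empty sequence).
def Pre_calculate_segment_properties_py (segment : List (Int × Int)) : Prop := segment ≠ []
instance (segment : List (Int × Int)) : Decidable (Pre_calculate_segment_properties_py segment) := by unfold Pre_calculate_segment_properties_py; infer_instance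
def pvWitness_calculate_segment_properties_py : (List (Int × Int)) := [(1, 2), (3, -4)]
def Spec_calculate_segment_properties_py (segment : List (Int × Int)) (out : List (String × Int)) : Prop := out = calculate_segment_properties_py_alt segment
instance (segment : List (Int × Int)) (out : List (String × Int)) : Decidable (Spec_calculate_segment_properties_py segment out) := by unfold Spec_calculate_segment_properties_py; infer_instance

-- ===== CLAIM =====
def Claim_equal_calculate_segment_properties_py : Prop := ∀ (segment : List (Int × Int)), Dom_calculate_segment_properties_py segment → Pre_calculate_segment_properties_py segment → Spec_calculate_segment_properties_py segment (calculate_segment_properties_py segment)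

-- ===== LEMMAS AND PROOFS =====
theorem pv_fold4 (l : List (Int × Int)) (a b c d : Int) :
    l.foldl
      (fun (s : Int × Int × Int × Int) (c : Int × Int) =>
        let min_y := if c.1 < s.1 then c.1 else s.1
        let max_y := if c.1 > s.2.1 then c.1 else s.2.1
        let min_x := if c.2 < s.2.2.1 then c.2 else s.2.2.1
        let max_x := if c.2 > s.2.2.2 then c.2 else s.2.2.2
        (min_y, max_y, min_x, max_x))
      (a, b, c, d)
    = ((l.map (fun p => p.1)).foldl min a, (l.map (fun p => p.1)).foldl max b,
       (l.map (fun p => p.2)).foldl min c, (l.map (fun p => p.2)).foldl max d) := by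
  induction l generalizing a b c d with
  | nil => rfl
  | cons h t ih =>
      simp only [List.foldl_cons, List.map_cons, ih]
      congr 1 <;> [skip; congr 1] <;> [skip; skip; congr 1] <;>
        · congr 1
          simp [min_def, max_def]; omega

theorem calculate_segment_properties_py_spec_aux (segment : List (Int × Int))
    (h : segment ≠ []) :
    calculate_segment_properties_py segment = calculate_segment_properties_py_alt segment := by
  match segment with
  | [] => exact absurd rfl h
  | (y, x) :: rest =>
      simp only [calculate_segment_properties_py, calculate_segment_properties_py_alt,
        List.map_cons, PySem.List.min?_id_cons, PySem.List.max?_id_cons, pv_fold4]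

-- ===== VERDICT =====
theorem calculate_segment_properties_py_spec : Claim_equal_calculate_segment_properties_py := by
  intro segment _ hpre
  exact calculate_segment_properties_py_spec_aux segment hpre
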